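-- pv_equiv track=rewrite | github.com/Veroni4k-a/sdr_radio | two_cadr.py | find_hsync_positions
-- ===== SOURCE A (Python) =====
-- def find_hsync_positions(signal, threshold, min_width):
--     in_sync = False
--     sync_start = 0
--     syncs = []
--
--     for i, val in enumerate(signal):
--         if val < threshold:
--             if not in_sync:
--                 sync_start = i
--                 in_sync = True
--         else:
--             if in_sync:
--                 if (i - sync_start) >= min_width:
--                     syncs.append(i)  # Конец импульса
--                 in_sync = False
--     return syncs
-- ===== SOURCE B (Python) =====
-- def find_hsync_positions(sig, threshold, min_width):
--     # Pass 1: decompose the input into maximal runs of (is_low, length).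
--     runs = []
--     cur = None
--     for v in sig:
--         low = v < threshold
--         if cur is None:
--             cur = (low, 1)
--         elif cur[0] == low:
--             cur = (low, cur[1] + 1)
--         else:
--             runs.append(cur)
--             cur = (low, 1)
--     if cur is not None:
--         runs.append(cur)
--     # Pass 2: every low run except a trailing one ends at offset+length.
--     out = []
--     pos = 0
--     for low, length in runs[:-1]:
--         pos += length
--         if low and length >= min_width:
--             out.append(pos)
--     return out
-- ===== Notes on version B (the rewrite author's own statement) =====
-- stated objective: alternative
-- what changed: Replaces the per-element in_sync/sync_start state machine with a two-pass run-length decomposition: the signal is first grouped into maximal (is_low, length) runs, then a second pass over all runs but the trailing one emits offset+length for each wide low run.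
import Mathlib
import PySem

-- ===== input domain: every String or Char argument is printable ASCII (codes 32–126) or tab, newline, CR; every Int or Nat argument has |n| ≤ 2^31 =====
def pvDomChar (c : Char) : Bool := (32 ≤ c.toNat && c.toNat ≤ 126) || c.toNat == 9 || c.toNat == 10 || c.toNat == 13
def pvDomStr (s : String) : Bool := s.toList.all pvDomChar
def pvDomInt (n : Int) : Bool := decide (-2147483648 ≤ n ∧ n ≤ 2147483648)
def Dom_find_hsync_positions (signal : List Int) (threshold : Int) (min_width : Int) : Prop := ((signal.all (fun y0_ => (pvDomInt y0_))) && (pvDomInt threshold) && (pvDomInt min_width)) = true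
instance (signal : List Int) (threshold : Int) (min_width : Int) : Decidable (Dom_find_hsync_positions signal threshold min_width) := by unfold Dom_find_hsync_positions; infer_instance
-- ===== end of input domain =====

-- B replaces A's per-element state machine by a two-pass run-length decomposition
-- (maximal (is_low, length) runs, then a pass over all runs but the trailing one);
-- objective: alternative (same asymptotic cost, different shape).

-- ===== PORT A =====
-- literal transliteration of A's enumerate loop with state (in_sync, sync_start, syncs)
def find_hsync_positions (signal : List Int) (threshold : Int) (min_width : Int) : List Int :=
  let st := (PySem.List.enumerate signal 0).foldl
    (fun (st : Bool × Int × List Int) (iv : Int × Int) =>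
      if iv.2 < threshold then
        if !st.1 then (true, iv.1, st.2.2) else st
      else
        if st.1 then
          (false, st.2.1, if iv.1 - st.2.1 ≥ min_width then st.2.2 ++ [iv.1] else st.2.2)
        else st)
    (false, 0, [])
  st.2.2

-- ===== PORT B =====
def find_hsync_positions_alt (signal : List Int) (threshold : Int) (min_width : Int) : List Int :=
  -- Pass 1: fold building the finished runs plus the current run `cur`
  let p := signal.foldl
    (fun (st : List (Bool × Int) × Option (Bool × Int)) (v : Int) =>
      let low := decide (v < threshold)
      match st.2 with
      | none => (st.1, some (low, 1))
      | some c =>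
        if c.1 = low then (st.1, some (low, c.2 + 1))
        else (st.1 ++ [c], some (low, 1)))
    ([], none)
  let runs := match p.2 with
    | none => p.1
    | some c => p.1 ++ [c]
  -- Pass 2: over runs[:-1], accumulate the offset and emit ends of wide low runs
  let q := runs.dropLast.foldl
    (fun (st : Int × List Int) (r : Bool × Int) =>
      (st.1 + r.2, if r.1 && decide (r.2 ≥ min_width) then st.2 ++ [st.1 + r.2] else st.2))
    (0, [])
  q.2

-- ===== PRECONDITION & SPEC =====
def Spec_find_hsync_positions (signal : List Int) (threshold : Int) (min_width : Int) (out : List Int) : Prop := out = find_hsync_positions_alt signal threshold min_width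
instance (signal : List Int) (threshold : Int) (min_width : Int) (out : List Int) : Decidable (Spec_find_hsync_positions signal threshold min_width out) := by unfold Spec_find_hsync_positions; infer_instance

-- ===== CLAIM (what is proved, stated in full; the proofs are below) =====
def Claim_equal_find_hsync_positions : Prop := ∀ (signal : List Int) (threshold : Int) (min_width : Int), Dom_find_hsync_positions signal threshold min_width → Spec_find_hsync_positions signal threshold min_width (find_hsync_positions signal threshold min_width)

-- ===== LEMMAS AND PROOFS =====

-- mid-level recursive description of A's state machine
def pvG (t mw : Int) : List Int → Int → Option Int → List Int
  | [], _, _ => []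
  | v :: vs, i, s =>
    if v < t then
      pvG t mw vs (i + 1) (match s with | none => some i | some st => some st)
    else
      match s with
      | some st => (if mw ≤ i - st then [i] else []) ++ pvG t mw vs (i + 1) none
      | none => pvG t mw vs (i + 1) none

-- recursive form of B's pass 1 (runs of v::vs with current run (low, cnt))
def pvRunsAux (t : Int) (low : Bool) (cnt : Int) : List Int → List (Bool × Int)
  | [] => [(low, cnt)]
  | v :: vs =>
    if decide (v < t) = low then pvRunsAux t low (cnt + 1) vs
    else (low, cnt) :: pvRunsAux t (decide (v < t)) 1 vs

-- recursive form of B's pass 2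
def pvH (mw : Int) : List (Bool × Int) → Int → List Int
  | [], _ => []
  | r :: rs, pos =>
    (if r.1 && decide (r.2 ≥ mw) then [pos + r.2] else []) ++ pvH mw rs (pos + r.2)

theorem pvRunsAux_ne_nil (t : Int) (low : Bool) (cnt : Int) (vs : List Int) :
    pvRunsAux t low cnt vs ≠ [] := by
  induction vs generalizing low cnt with
  | nil => simp [pvRunsAux]
  | cons v vs ih =>
    simp only [pvRunsAux]
    split <;> simp [ih]

theorem pvA_fold (t mw : Int) (vs : List Int) :
    ∀ (i : Int) (ins : Bool) (st : Int) (acc : List Int),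
    ((PySem.List.enumerate vs i).foldl
      (fun (s : Bool × Int × List Int) (iv : Int × Int) =>
        if iv.2 < t then
          if !s.1 then (true, iv.1, s.2.2) else s
        else
          if s.1 then
            (false, s.2.1, if iv.1 - s.2.1 ≥ mw then s.2.2 ++ [iv.1] else s.2.2)
          else s)
      (ins, st, acc)).2.2
      = acc ++ pvG t mw vs i (cond ins (some st) none) := by
  induction vs with
  | nil => intro i ins st acc; simp [PySem.List.enumerate_nil, pvG]
  | cons v vs ih =>
    intro i ins st acc
    rw [PySem.List.enumerate_cons, List.foldl_cons]
    by_cases hv : v < t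
    · cases ins with
      | false => simpa [hv, pvG] using ih (i + 1) true i acc
      | true => simpa [hv, pvG] using ih (i + 1) true st acc
    · cases ins with
      | false => simpa [hv, pvG] using ih (i + 1) false st acc
      | true =>
        by_cases hw : mw ≤ i - st
        · simpa [hv, hw, pvG, List.append_assoc] using ih (i + 1) false st (acc ++ [i])
        · simpa [hv, hw, pvG] using ih (i + 1) false st acc

theorem pvB_pass1 (t : Int) (vs : List Int) :
    ∀ (acc : List (Bool × Int)) (low : Bool) (cnt : Int),
    (let p := vs.foldl
        (fun (st : List (Bool × Int) × Option (Bool × Int)) (v : Int) =>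
          let l := decide (v < t)
          match st.2 with
          | none => (st.1, some (l, 1))
          | some c =>
            if c.1 = l then (st.1, some (l, c.2 + 1))
            else (st.1 ++ [c], some (l, 1)))
        (acc, some (low, cnt));
      match p.2 with
      | none => p.1
      | some c => p.1 ++ [c])
      = acc ++ pvRunsAux t low cnt vs := by
  induction vs with
  | nil => intro acc low cnt; simp [pvRunsAux]
  | cons v vs ih =>
    intro acc low cnt
    simp only [List.foldl_cons]
    by_cases h : low = decide (v < t)
    · simp only [pvRunsAux, ← h]
      simpa [h] using ih acc low (cnt + 1)
    · have h' : ¬ decide (v < t) = low := fun e => h e.symm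
      simp only [pvRunsAux, if_neg h']
      simpa [h, h'] using ih (acc ++ [(low, cnt)]) (decide (v < t)) 1

theorem pvB_pass2 (mw : Int) (rs : List (Bool × Int)) :
    ∀ (pos : Int) (out : List Int),
    (rs.foldl
      (fun (st : Int × List Int) (r : Bool × Int) =>
        (st.1 + r.2, if r.1 && decide (r.2 ≥ mw) then st.2 ++ [st.1 + r.2] else st.2))
      (pos, out)).2
      = out ++ pvH mw rs pos := by
  induction rs with
  | nil => intro pos out; simp [pvH]
  | cons r rs ih =>
    intro pos out
    simp only [List.foldl_cons, pvH]
    by_cases h : r.1 && decide (r.2 ≥ mw)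
    · simpa [h, List.append_assoc] using ih (pos + r.2) (out ++ [pos + r.2])
    · simpa [h] using ih (pos + r.2) out

theorem pvG_eq_pvH (t mw : Int) (vs : List Int) :
    ∀ (low : Bool) (cnt i : Int),
    pvG t mw vs i (cond low (some (i - cnt)) none)
      = pvH mw ((pvRunsAux t low cnt vs).dropLast) (i - cnt) := by
  induction vs with
  | nil => intro low cnt i; cases low <;> simp [pvG, pvRunsAux, pvH]
  | cons v vs ih =>
    intro low cnt i
    by_cases h : decide (v < t) = low
    · -- same run continues
      have hd : (pvRunsAux t low cnt (v :: vs)) = pvRunsAux t low (cnt + 1) vs := by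
        simp [pvRunsAux, h]
      rw [hd]
      cases low with
      | true =>
        have hv : v < t := by simpa using h
        have hthis := ih true (cnt + 1) (i + 1)
        rw [show i + 1 - (cnt + 1) = i - cnt by ring] at hthis
        simp only [Bool.cond_true] at hthis
        simp [pvG, hv, hthis]
      | false =>
        have hv : ¬ v < t := by simpa using h
        have hthis := ih false (cnt + 1) (i + 1)
        rw [show i + 1 - (cnt + 1) = i - cnt by ring] at hthis
        simp only [Bool.cond_false] at hthis
        simp [pvG, hv, hthis]
    · -- run boundary
      have hd : (pvRunsAux t low cnt (v :: vs))
          = (low, cnt) :: pvRunsAux t (decide (v < t)) 1 vs := by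
        simp [pvRunsAux, h]
      obtain ⟨y, ys, e⟩ := List.exists_cons_of_ne_nil (pvRunsAux_ne_nil t (decide (v < t)) 1 vs)
      have hdrop : ((low, cnt) :: pvRunsAux t (decide (v < t)) 1 vs).dropLast
          = (low, cnt) :: (pvRunsAux t (decide (v < t)) 1 vs).dropLast := by
        rw [e]; rfl
      rw [hd, hdrop]
      cases low with
      | true =>
        have hv : ¬ v < t := by simpa using h
        have hthis := ih false 1 (i + 1)
        simp only [decide_eq_false hv] at hthis ⊢
        simp only [Bool.cond_false] at hthis
        rw [show i + 1 - 1 = i by ring] at hthis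
        simp [pvG, hv, pvH, hthis, ge_iff_le,
          show i - cnt + cnt = i by ring, show i - (i - cnt) = cnt by ring]
      | false =>
        have hv : v < t := by simpa using h
        have hthis := ih true 1 (i + 1)
        simp only [decide_eq_true hv] at hthis ⊢
        simp only [Bool.cond_true] at hthis
        rw [show i + 1 - 1 = i by ring] at hthis
        simp [pvG, hv, pvH, hthis, show i - cnt + cnt = i by ring]

-- ===== VERDICT =====
theorem find_hsync_positions_spec : Claim_equal_find_hsync_positions := by
  intro signal threshold min_width _
  unfold Spec_find_hsync_positions find_hsync_positions find_hsync_positions_alt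
  cases signal with
  | nil => simp [PySem.List.enumerate_nil]
  | cons v vs =>
    rw [PySem.List.enumerate_cons, List.foldl_cons, List.foldl_cons]
    have hB1 := pvB_pass1 threshold vs [] (decide (v < threshold)) 1
    by_cases hv : v < threshold
    · have hG := pvG_eq_pvH threshold min_width vs true 1 1
      simp only [Bool.cond_true] at hG
      rw [show (1 : Int) - 1 = 0 by ring] at hG
      simp only [decide_eq_true hv, List.nil_append] at hB1
      simp only [if_pos hv, Bool.not_false, if_true, zero_add, decide_eq_true hv]
      rw [pvA_fold threshold min_width vs 1 true 0 []]
      rw [hB1, pvB_pass2]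
      simpa using hG
    · have hG := pvG_eq_pvH threshold min_width vs false 1 1
      simp only [Bool.cond_false] at hG
      rw [show (1 : Int) - 1 = 0 by ring] at hG
      simp only [decide_eq_false hv, List.nil_append] at hB1
      simp only [if_neg hv, Bool.false_eq_true, if_false, zero_add, decide_eq_false hv]
      rw [pvA_fold threshold min_width vs 1 false 0 []]
      rw [hB1, pvB_pass2]
      simpa using hG
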